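-- pv_equiv track=rewrite | github.com/akman12914/platform-demo | ceil_panel_final.py | split_sink_length
-- ===== SOURCE A (Python) =====
-- from typing import List, Tuple, Optional, Literal, Dict, Set
--
-- BODY_MAX_W = 1450  # BODY: 허용 최대 '길이'(L′)
--
-- SIDE_MAX_W = 1200  # SIDE: 허용 최대 '길이'(L′)
--
-- def split_sink_length(sink_L: int) -> List[Tuple[str, int]]:
--     """
--     세면부 길이 방향 분할 (L′).
--     결과: [("SIDE"/"BODY"/"RBP_BODY", L_part), ...] (왼→오)
--     - 마지막 원소는 항상 "RBP_BODY" (샤워부와 맞닿는 세면부 마지막 열)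
--     - 남는 길이 ≤ SIDE_MAX_W(1200)이면 그 남은 조각은 항상 '가장자리'에 위치하도록 정렬
--       (BODY-SIDE-BODY 같은 패턴이 나오지 않게 함)
--     """
--     sink_L = int(sink_L)
--     cols: List[Tuple[str, int]] = []
--
--     # 전체가 BODY 한 판이면 RBP_BODY 하나로 끝
--     if sink_L <= BODY_MAX_W:
--         cols.append(("RBP_BODY", sink_L))
--         return cols
--
--     # 오른쪽(샤워부 쪽)에는 항상 RBP BODY를 한 칸 둔다.
--     rbp_L = BODY_MAX_W
--     remain = sink_L - rbp_L  # RBP_BODY 왼쪽에 채워야 할 길이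
--
--     # RBP 왼쪽 구간을 "오른쪽에서 왼쪽"으로 채운 뒤, 나중에 뒤집어서 사용
--     segments_rev: List[Tuple[str, int]] = []  # 오른쪽(=RBP 인접)에서 왼쪽으로 쌓는 리스트
--
--     while remain > 0:
--         if remain <= SIDE_MAX_W:
--             # 남은 길이가 1200 이하 → 이 조각은 SIDE로, 가장자리 한쪽에만 위치
--             segments_rev.append(("SIDE", remain))
--             remain = 0
--         elif remain <= BODY_MAX_W:
--             # 남은 길이가 BODY_MAX_W 이하이면 BODY 한 판으로 처리
--             segments_rev.append(("BODY", remain))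
--             remain = 0
--         else:
--             # 아직 길이가 크면 BODY_MAX_W만큼 BODY를 하나 더 붙이고 계속
--             segments_rev.append(("BODY", BODY_MAX_W))
--             remain -= BODY_MAX_W
--
--     # segments_rev 는 "RBP 바로 옆 → 바깥쪽" 순서이므로, 이를 뒤집어서 왼→오 순서로 만든다.
--     pre_cols = list(reversed(segments_rev))
--
--     cols.extend(pre_cols)
--     cols.append(("RBP_BODY", rbp_L))
--     return cols
-- ===== SOURCE B (Python) =====
-- BODY_MAX_W = 1450
-- SIDE_MAX_W = 1200
--
-- def split_sink_length(sink_L):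
--     sink_L = int(sink_L)
--     if sink_L <= BODY_MAX_W:
--         return [("RBP_BODY", sink_L)]
--     q, r = divmod(sink_L - BODY_MAX_W, BODY_MAX_W)
--     cols = []
--     if r != 0:
--         cols.append(("SIDE" if r <= SIDE_MAX_W else "BODY", r))
--     cols += [("BODY", BODY_MAX_W)] * q
--     cols.append(("RBP_BODY", BODY_MAX_W))
--     return cols
-- ===== Notes on version B (the rewrite author's own statement) =====
-- stated objective: simpler
-- what changed: Replaces A's subtract-in-a-loop that builds a reversed segment list and flips it with a closed-form divmod: one optional leftover tuple, q replicated BODY panels, then the RBP_BODY cap, built directly left-to-right.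
import Mathlib
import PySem

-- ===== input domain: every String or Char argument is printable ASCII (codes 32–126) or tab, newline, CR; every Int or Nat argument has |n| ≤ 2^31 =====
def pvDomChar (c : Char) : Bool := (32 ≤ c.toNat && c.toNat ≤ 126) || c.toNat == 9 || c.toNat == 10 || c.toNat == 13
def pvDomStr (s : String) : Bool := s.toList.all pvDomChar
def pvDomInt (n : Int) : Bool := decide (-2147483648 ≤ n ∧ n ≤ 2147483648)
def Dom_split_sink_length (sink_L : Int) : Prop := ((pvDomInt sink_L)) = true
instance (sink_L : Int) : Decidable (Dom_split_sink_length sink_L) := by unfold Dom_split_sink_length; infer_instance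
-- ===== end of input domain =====

-- B replaces A's subtract-loop + reverse with a closed-form divmod build; objective: simpler.
-- ===== PORT A =====
-- the 'while remain > 0' loop of A: appends to segments_rev exactly as the Python does
def splitLoopA (remain : Int) (segments_rev : List (String × Int)) : List (String × Int) :=
  if remain > 0 then
    if remain ≤ 1200 then segments_rev ++ [("SIDE", remain)]
    else if remain ≤ 1450 then segments_rev ++ [("BODY", remain)]
    else splitLoopA (remain - 1450) (segments_rev ++ [("BODY", (1450 : Int))])
  else segments_rev
termination_by remain.toNat
decreasing_by omega

def split_sink_length (sink_L : Int) : List (String × Int) :=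
  if sink_L ≤ 1450 then [("RBP_BODY", sink_L)]
  else
    let rbp_L : Int := 1450
    let remain := sink_L - rbp_L
    let pre_cols := (splitLoopA remain []).reverse
    pre_cols ++ [("RBP_BODY", rbp_L)]

-- ===== PORT B =====
def split_sink_length_alt (sink_L : Int) : List (String × Int) :=
  if sink_L ≤ 1450 then [("RBP_BODY", sink_L)]
  else
    let q := PySem.Int.floordiv (sink_L - 1450) 1450
    let r := PySem.Int.mod (sink_L - 1450) 1450
    let head := if r ≠ 0 then [((if r ≤ 1200 then "SIDE" else "BODY"), r)] else []
    head ++ List.replicate q.toNat ("BODY", (1450 : Int)) ++ [("RBP_BODY", (1450 : Int))]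

-- ===== PRECONDITION & SPEC =====
def Spec_split_sink_length (sink_L : Int) (out : List (String × Int)) : Prop := out = split_sink_length_alt sink_L
instance (sink_L : Int) (out : List (String × Int)) : Decidable (Spec_split_sink_length sink_L out) := by unfold Spec_split_sink_length; infer_instance

-- ===== CLAIM (what is proved, stated in full; the proofs are below) =====
def Claim_equal_split_sink_length : Prop := ∀ (sink_L : Int), Dom_split_sink_length sink_L → Spec_split_sink_length sink_L (split_sink_length sink_L)

-- ===== LEMMAS AND PROOFS =====

-- ===== VERDICT (by name: the statement is the Claim_ definition above) =====
theorem splitLoopA_acc (remain : Int) (acc : List (String × Int)) :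
    splitLoopA remain acc = acc ++ splitLoopA remain [] := by
  induction hn : remain.toNat using Nat.strong_induction_on generalizing remain acc with
  | _ n ih =>
    by_cases h1 : remain > 0
    · by_cases h2 : remain ≤ 1200
      · simp [splitLoopA, h1, h2]
      · by_cases h3 : remain ≤ 1450
        · simp [splitLoopA, h1, h2, h3]
        · conv_lhs => rw [splitLoopA]
          conv_rhs => rw [splitLoopA]
          rw [if_pos h1, if_neg h2, if_neg h3, if_pos h1, if_neg h2, if_neg h3]
          rw [ih ((remain - 1450).toNat) (by omega) (remain - 1450)
                (acc ++ [("BODY", (1450 : Int))]) rfl]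
          simp only [List.nil_append]
          rw [ih ((remain - 1450).toNat) (by omega) (remain - 1450)
                ([("BODY", (1450 : Int))]) rfl]
          simp
    · simp [splitLoopA, h1]

-- closed form of the reversed loop result
theorem splitLoopA_closed (remain : Int) (h : 0 < remain) :
    (splitLoopA remain []).reverse =
      (if PySem.Int.mod remain 1450 ≠ 0 then
        [((if PySem.Int.mod remain 1450 ≤ 1200 then "SIDE" else "BODY"), PySem.Int.mod remain 1450)]
       else []) ++
      List.replicate (PySem.Int.floordiv remain 1450).toNat ("BODY", (1450 : Int)) := by
  induction hn : remain.toNat using Nat.strong_induction_on generalizing remain with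
  | _ n ih =>
  rw [PySem.Int.mod_eq_emod_of_pos (by norm_num),
      PySem.Int.floordiv_eq_ediv_of_pos (by norm_num)]
  by_cases h2 : remain ≤ 1200
  · have hq : remain / 1450 = 0 := by omega
    have hr : remain % 1450 = remain := by omega
    simp [splitLoopA, h, h2, hq, hr]
    omega
  · by_cases h3 : remain ≤ 1450
    · by_cases h4 : remain = 1450
      · subst h4; simp [splitLoopA]
      · have hq : remain / 1450 = 0 := by omega
        have hr : remain % 1450 = remain := by omega
        simp [splitLoopA, h, h2, h3, hq, hr]
        omega
    · rw [splitLoopA]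
      simp only [h, h2, h3, if_false, if_pos]
      rw [splitLoopA_acc, List.reverse_append,
          ih ((remain - 1450).toNat) (by omega) (remain - 1450) (by omega) rfl]
      rw [PySem.Int.mod_eq_emod_of_pos (by norm_num : (0:Int) < 1450),
          PySem.Int.floordiv_eq_ediv_of_pos (by norm_num : (0:Int) < 1450)]
      have hr : (remain - 1450) % 1450 = remain % 1450 := by omega
      have hq : (remain - 1450) / 1450 = remain / 1450 - 1 := by omega
      have hq1 : (1:Int) ≤ remain / 1450 := by omega
      rw [hr, hq]
      have : (remain / 1450 - 1).toNat + 1 = (remain / 1450).toNat := by omega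
      rw [← this, List.replicate_succ']
      simp

theorem split_sink_length_spec : Claim_equal_split_sink_length := by
  intro sink_L _
  unfold Spec_split_sink_length split_sink_length split_sink_length_alt
  by_cases h : sink_L ≤ 1450
  · simp [h]
  · simp only [h, if_false]
    rw [splitLoopA_closed (sink_L - 1450) (by omega)]
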